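-- pv_equiv track=rewrite | github.com/pygments/pygments | pygments/lexers/fountain.py | _next_special_index
-- ===== SOURCE A (Python) =====
-- def _next_special_index(text, start):
--     i = start
--     while i < len(text):
--         if text.startswith(('/*', '[[', '***', '**'), i):
--             return i
--         if text[i] in '\\*_#':
--             return i
--         i += 1
--     return len(text)
-- ===== SOURCE B (Python) =====
-- def _next_special_index(text, start):
--     best = len(text)
--     for tok in ('\\', '*', '_', '#', '/*', '[['):
--         j = text.find(tok, start)
--         if 0 <= j < best:
--             best = j
--     return best
-- ===== Notes on version B (the rewrite author's own statement) =====
-- stated objective: faster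
-- what changed: Instead of A's per-position while-loop that tests every token at each index, B runs six independent str.find searches, one per special token ('\', '*', '_', '#', '/*', '[['), and returns the minimum nonnegative hit (defaulting to len(text)); correct because a position is special iff one of these six tokens occurs there ('**'/'***' are subsumed by '*').
-- intended difference: For negative start on a text that contains special markup anywhere, A wraps the index (scanning the wrapped tail, returning a negative index on a hit there, and otherwise rescanning from 0), while B interprets start as Python's find/slice bound and returns the absolute nonnegative index of the first special token at or after position len(text)+start (len(text) if there is none), which is the intended index into the text. — e.g. on _next_special_index("a*", -1): A returns -1, B returns 1
import Mathlib
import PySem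

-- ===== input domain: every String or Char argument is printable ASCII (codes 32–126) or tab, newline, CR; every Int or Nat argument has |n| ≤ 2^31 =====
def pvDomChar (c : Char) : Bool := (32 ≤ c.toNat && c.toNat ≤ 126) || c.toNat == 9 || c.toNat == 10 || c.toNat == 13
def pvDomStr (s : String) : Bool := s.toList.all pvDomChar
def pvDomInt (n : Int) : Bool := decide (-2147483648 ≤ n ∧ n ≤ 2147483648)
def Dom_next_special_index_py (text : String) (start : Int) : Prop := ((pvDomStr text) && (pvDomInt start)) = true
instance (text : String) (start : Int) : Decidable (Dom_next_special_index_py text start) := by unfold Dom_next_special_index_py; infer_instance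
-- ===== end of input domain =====

-- B replaces A's per-position scan by six independent str.find searches (one per special token)
-- combined by taking the minimum nonnegative hit; a timing run measures the speed claim.

-- ===== PORT A =====
-- text.startswith(p, i): Python clamps a negative i to len(text)+i, floored at 0 (exact for nonempty p)
def pvStartsFrom (cs p : List Char) (i : Int) : Bool :=
  let pos : Nat := if i < 0 then ((cs.length : Int) + i).toNat else i.toNat
  PySem.Chars.startswith (List.drop pos cs) p

-- the while-loop; fuel (len(text) - i).toNat only makes the recursion structural: it is 0
-- exactly when the loop condition i < len(text) is false
def nsiGo (cs : List Char) : Nat → Int → Int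
  | 0, _ => (cs.length : Int)
  | fuel + 1, i =>
    if pvStartsFrom cs ['/', '*'] i || pvStartsFrom cs ['[', '['] i
        || pvStartsFrom cs ['*', '*', '*'] i || pvStartsFrom cs ['*', '*'] i then i
    else
      match PySem.List.pyGet? cs i with
      | some c => if c ∈ ['\\', '*', '_', '#'] then i else nsiGo cs fuel (i + 1)
      | none => 0   -- Python raises IndexError here; such inputs are excluded by Pre_

def next_special_index_py (text : String) (start : Int) : Int :=
  nsiGo text.toList (((text.toList.length : Int) - start).toNat) start

-- ===== PORT B =====
-- for tok in ('\\','*','_','#','/*','[['): j = text.find(tok, start); keep the least nonnegative j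
def next_special_index_py_alt (text : String) (start : Int) : Int :=
  [['\\'], ['*'], ['_'], ['#'], ['/', '*'], ['[', '[']].foldl
    (fun best tok =>
      let j := PySem.Chars.findFrom text.toList tok start none
      if 0 ≤ j ∧ j < best then j else best)
    ((text.toList.length : Int))

-- ===== PRECONDITION & SPEC =====
-- Pre_ excludes exactly the inputs on which A raises IndexError: start < -len(text) while
-- the text does not begin with one of the special prefixes (there A's wrapped text[i] lookup fails).
def Pre_next_special_index_py (text : String) (start : Int) : Prop :=
  -(text.toList.length : Int) ≤ start ∨
    (PySem.Chars.startswith text.toList ['/', '*'] || PySem.Chars.startswith text.toList ['[', '[']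
      || PySem.Chars.startswith text.toList ['*', '*', '*']
      || PySem.Chars.startswith text.toList ['*', '*']) = true
instance (text : String) (start : Int) : Decidable (Pre_next_special_index_py text start) := by
  unfold Pre_next_special_index_py; infer_instance

def pvWitness_next_special_index_py : String × Int := ("ab*cd", 0)

-- For negative start on a text containing special markup anywhere, A wraps the index (scanning
-- the wrapped tail, returning a NEGATIVE index on a hit there, and otherwise rescanning from 0),
-- while B interprets start as Python's find/slice bound and returns the absolute nonnegative index
-- of the first special token at or after position len(text)+start (len(text) if none) — the
-- intended index into the text.
-- (D_ reads: start < 0 and the text contains one of the characters \\ * _ # or the substring '[['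
-- — exactly "the text contains special markup": '/*' necessarily contains '*')
def D_next_special_index_py (text : String) (start : Int) : Prop :=
  start < 0 ∧ ((∃ c ∈ text.toList, c = '\\' ∨ c = '*' ∨ c = '_' ∨ c = '#') ∨
    ['[', '['] <:+: text.toList)
instance (text : String) (start : Int) : Decidable (D_next_special_index_py text start) := by
  unfold D_next_special_index_py; infer_instance

def Spec_next_special_index_py (text : String) (start : Int) (out : Int) : Prop :=
  ¬ D_next_special_index_py text start → out = next_special_index_py_alt text start
instance (text : String) (start : Int) (out : Int) : Decidable (Spec_next_special_index_py text start out) := by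
  unfold Spec_next_special_index_py; infer_instance

def pvDiffWitness_next_special_index_py : String × Int := ("a*", -1)
def pvDiffWitnessOut_next_special_index_py : Int × Int := (-1, 1)

-- ===== CLAIM (what is proved, stated in full; the proofs are below) =====
def Claim_unchanged_next_special_index_py : Prop := ∀ (text : String) (start : Int), Dom_next_special_index_py text start → Pre_next_special_index_py text start → Spec_next_special_index_py text start (next_special_index_py text start)
def Claim_changed_next_special_index_py : Prop := Dom_next_special_index_py (pvDiffWitness_next_special_index_py.1) (pvDiffWitness_next_special_index_py.2) ∧ Pre_next_special_index_py (pvDiffWitness_next_special_index_py.1) (pvDiffWitness_next_special_index_py.2) ∧ D_next_special_index_py (pvDiffWitness_next_special_index_py.1) (pvDiffWitness_next_special_index_py.2) ∧ next_special_index_py (pvDiffWitness_next_special_index_py.1) (pvDiffWitness_next_special_index_py.2) = pvDiffWitnessOut_next_special_index_py.1 ∧ next_special_index_py_alt (pvDiffWitness_next_special_index_py.1) (pvDiffWitness_next_special_index_py.2) = pvDiffWitnessOut_next_special_index_py.2 ∧ pvDiffWitnessOut_next_special_index_py.1 ≠ pvDiffWitnessOut_next_special_index_py.2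
def Claim_exact_next_special_index_py : Prop := ∀ (text : String) (start : Int), Dom_next_special_index_py text start → Pre_next_special_index_py text start → D_next_special_index_py text start → next_special_index_py text start ≠ next_special_index_py_alt text start

-- ===== LEMMAS AND PROOFS =====

-- special markup at position p of the text (char class hit or '/*' / '[[' prefix)
def pvSpecialAt (cs : List Char) (p : Nat) : Bool :=
  match List.drop p cs with
  | [] => false
  | c :: rest => c = '\\' || c = '*' || c = '_' || c = '#'
      || (c = '/' && rest.head? = some '*') || (c = '[' && rest.head? = some '[')

theorem prefix_special (cs : List Char) (p : Nat) (w : List Char)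
    (hw : w ∈ [['\\'], ['*'], ['_'], ['#'], ['/', '*'], ['[', '[']])
    (h : w <+: List.drop p cs) : p < cs.length ∧ pvSpecialAt cs p = true := by
  obtain ⟨t, ht⟩ := h
  have hw1 : 1 ≤ w.length := by
    simp only [List.mem_cons, List.not_mem_nil, or_false] at hw
    rcases hw with h|h|h|h|h|h <;> subst h <;> simp
  have hlen : p < cs.length := by
    have := congrArg List.length ht
    simp only [List.length_append, List.length_drop] at this; omega
  refine ⟨hlen, ?_⟩
  rw [pvSpecialAt, ← ht]
  simp only [List.mem_cons, List.not_mem_nil, or_false] at hw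
  rcases hw with h|h|h|h|h|h <;> subst h <;> simp

theorem specialAt_witness (cs : List Char) (p : Nat) (h : pvSpecialAt cs p = true) :
    ∃ w ∈ [['\\'], ['*'], ['_'], ['#'], ['/', '*'], ['[', '[']], w <+: List.drop p cs := by
  rw [pvSpecialAt] at h
  rcases hd : List.drop p cs with _ | ⟨c, rest⟩
  · rw [hd] at h; simp at h
  · rw [hd] at h
    simp only [Bool.or_eq_true, Bool.and_eq_true, decide_eq_true_eq] at h
    rcases h with ((((h | h) | h) | h) | ⟨h1, h2⟩) | ⟨h1, h2⟩
    · exact ⟨['\\'], by simp, by rw [h]; exact ⟨rest, rfl⟩⟩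
    · exact ⟨['*'], by simp, by rw [h]; exact ⟨rest, rfl⟩⟩
    · exact ⟨['_'], by simp, by rw [h]; exact ⟨rest, rfl⟩⟩
    · exact ⟨['#'], by simp, by rw [h]; exact ⟨rest, rfl⟩⟩
    · subst h1
      rcases rest with _ | ⟨r, rest'⟩
      · simp at h2
      · simp only [List.head?, Option.some.injEq] at h2; subst h2
        exact ⟨['/', '*'], by simp, ⟨rest', rfl⟩⟩
    · subst h1
      rcases rest with _ | ⟨r, rest'⟩
      · simp at h2
      · simp only [List.head?, Option.some.injEq] at h2; subst h2
        exact ⟨['[', '['], by simp, ⟨rest', rfl⟩⟩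

theorem D_iff (text : String) (start : Int) :
    D_next_special_index_py text start ↔
      (start < 0 ∧ ∃ p < text.toList.length, pvSpecialAt text.toList p = true) := by
  rw [D_next_special_index_py]
  generalize text.toList = cs
  refine and_congr_right fun hneg => ⟨?_, ?_⟩
  · rintro (⟨c, hc, hcl⟩ | hinf)
    · obtain ⟨p, hp, rfl⟩ := List.mem_iff_getElem.mp hc
      refine ⟨p, hp, ?_⟩
      rw [pvSpecialAt, List.drop_eq_getElem_cons hp]
      rcases hcl with h | h | h | h <;> simp [h]
    · obtain ⟨s, t, hst⟩ := hinf
      have hpre : ['[', '['] <+: List.drop s.length cs := by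
        rw [← hst, List.append_assoc, List.drop_left]
        exact ⟨t, rfl⟩
      obtain ⟨hL, hS⟩ := prefix_special cs s.length _ (by simp) hpre
      exact ⟨s.length, hL, hS⟩
  · rintro ⟨p, hpl, hsp⟩
    obtain ⟨w, hw, hpre⟩ := specialAt_witness cs p hsp
    simp only [List.mem_cons, List.not_mem_nil, or_false] at hw
    have hsub := hpre.subset
    have hdropsub : List.drop p cs ⊆ cs := List.drop_subset p cs
    rcases hw with h | h | h | h | h | h <;> subst h
    · exact Or.inl ⟨'\\', hdropsub (hsub (by simp)), by simp⟩
    · exact Or.inl ⟨'*', hdropsub (hsub (by simp)), by simp⟩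
    · exact Or.inl ⟨'_', hdropsub (hsub (by simp)), by simp⟩
    · exact Or.inl ⟨'#', hdropsub (hsub (by simp)), by simp⟩
    · exact Or.inl ⟨'*', hdropsub (hsub (by simp)), by simp⟩
    · exact Or.inr (hpre.isInfix.trans (List.drop_suffix p cs).isInfix)

-- A's loop entered with its canonical fuel
def nsiAt (cs : List Char) (i : Int) : Int :=
  nsiGo cs (((cs.length : Int) - i).toNat) i

theorem next_special_index_py_eq (text : String) (start : Int) :
    next_special_index_py text start = nsiAt text.toList start := rfl

-- regex-free description of "special at this position" on a char and its successor
def pvPatMatch (c : Char) (n : Option Char) : Bool :=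
  c = '\\' || c = '*' || c = '_' || c = '#'
    || (c = '/' && n = some '*') || (c = '[' && n = some '[')

def pvPairs (cs : List Char) : List (Char × Option Char) :=
  cs.zip ((List.drop 1 cs).map some ++ [none])

theorem pvPairs_length (cs : List Char) : (pvPairs cs).length = cs.length := by
  cases cs <;> simp [pvPairs]

theorem specialAt_eq (cs : List Char) (p : Nat) (hp : p < cs.length) :
    pvSpecialAt cs p = pvPatMatch cs[p] cs[p+1]? := by
  rw [pvSpecialAt, List.drop_eq_getElem_cons hp]
  simp [pvPatMatch, List.head?_drop]

theorem pairs_pred (cs : List Char) (p : Nat) (hp : p < (pvPairs cs).length) :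
    pvPatMatch ((pvPairs cs)[p]).1 ((pvPairs cs)[p]).2 = pvSpecialAt cs p := by
  have hp' : p < cs.length := by rwa [pvPairs_length] at hp
  rw [specialAt_eq cs p hp']
  have h2 : ((List.drop 1 cs).map some ++ [none])[p]'(by simp; omega) = cs[p+1]? := by
    rcases Nat.lt_or_ge (p+1) cs.length with h | h
    · rw [List.getElem_append_left (by simp; omega)]
      simp [List.getElem?_eq_getElem h]
    · have hpe : p + 1 = cs.length := by omega
      rw [List.getElem_append_right (by simp; omega)]
      simp [hpe]
  have h1 : (pvPairs cs)[p]'hp = (cs[p], cs[p+1]?) := by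
    simp only [pvPairs, List.getElem_zip, h2]
  rw [h1]

-- the combined "A hits at position p" condition equals pvSpecialAt
theorem hit_drop (cs : List Char) (p : Nat) (hp : p < cs.length) :
    (PySem.Chars.startswith (List.drop p cs) ['/', '*']
      || PySem.Chars.startswith (List.drop p cs) ['[', '[']
      || PySem.Chars.startswith (List.drop p cs) ['*', '*', '*']
      || PySem.Chars.startswith (List.drop p cs) ['*', '*']
      || decide (cs[p] ∈ ['\\', '*', '_', '#'])) = pvSpecialAt cs p := by
  rw [pvSpecialAt, List.drop_eq_getElem_cons hp]
  generalize cs[p] = c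
  generalize List.drop (p+1) cs = rest
  rcases rest with _ | ⟨r, rest'⟩
  · simp only [PySem.Chars.startswith, List.isPrefixOf, List.head?, Bool.and_false,
      Bool.false_or, Bool.or_false]
    rw [Bool.eq_iff_iff]
    simp only [Bool.or_eq_true, Bool.and_eq_true, decide_eq_true_eq,
      List.mem_cons, List.not_mem_nil, or_false]
    tauto
  · simp only [PySem.Chars.startswith, List.isPrefixOf, List.head?, Option.some.injEq]
    rw [Bool.eq_iff_iff]
    simp only [Bool.or_eq_true, Bool.and_eq_true, beq_iff_eq, decide_eq_true_eq,
      List.mem_cons, List.not_mem_nil, or_false]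
    tauto

theorem nsiAt_end (cs : List Char) (i : Int) (h : (cs.length : Int) ≤ i) :
    nsiAt cs i = (cs.length : Int) := by
  have h0 : ((cs.length : Int) - i).toNat = 0 := by omega
  rw [nsiAt, h0, nsiGo]

-- one unfolding of A's loop, for any in-bounds i (wrapped when negative)
theorem nsiAt_step (cs : List Char) (i : Int) (h0 : -(cs.length : Int) ≤ i)
    (h1 : i < (cs.length : Int)) :
    nsiAt cs i =
      if pvSpecialAt cs (if i < 0 then ((cs.length : Int) + i).toNat else i.toNat) then i
      else nsiAt cs (i + 1) := by
  set p : Nat := if i < 0 then ((cs.length : Int) + i).toNat else i.toNat with hpdef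
  have hp : p < cs.length := by
    rw [hpdef]; split <;> omega
  have hfuel : ((cs.length : Int) - i).toNat = ((cs.length : Int) - (i+1)).toNat + 1 := by omega
  rw [nsiAt, hfuel, nsiGo]
  have hsf : ∀ P, pvStartsFrom cs P i = PySem.Chars.startswith (List.drop p cs) P := by
    intro P; rw [pvStartsFrom, hpdef]
  have hget : PySem.List.pyGet? cs i = some cs[p] := by
    rw [PySem.List.pyGet?, PySem.List.pyIdx?]
    by_cases hneg : 0 ≤ i
    · have hi : i.toNat = p := by rw [hpdef]; split <;> omega
      simp [hneg, h1, hi, List.getElem?_eq_getElem hp]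
    · have hin : cs.length - (-i).toNat = p := by rw [hpdef]; split <;> omega
      have hneg' : ¬ (0 ≤ i) := hneg
      simp [hneg', h0, hin, List.getElem?_eq_getElem hp]
  rw [hsf, hsf, hsf, hsf, hget]
  have hh := hit_drop cs p hp
  by_cases hS : (PySem.Chars.startswith (List.drop p cs) ['/', '*']
      || PySem.Chars.startswith (List.drop p cs) ['[', '[']
      || PySem.Chars.startswith (List.drop p cs) ['*', '*', '*']
      || PySem.Chars.startswith (List.drop p cs) ['*', '*']) = true
  · have hsp : pvSpecialAt cs p = true := by rw [← hh]; simp [hS]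
    simp [hS, hsp]
  · rw [Bool.not_eq_true, Bool.or_eq_false_iff, Bool.or_eq_false_iff, Bool.or_eq_false_iff] at hS
    obtain ⟨⟨⟨hS1, hS2⟩, hS3⟩, hS4⟩ := hS
    rw [hS1, hS2, hS3, hS4] at hh
    simp only [Bool.false_or] at hh
    rw [← hh]
    simp only [hS1, hS2, hS3, hS4, Bool.or_self]
    by_cases hm : cs[p] ∈ ['\\', '*', '_', '#'] <;> simp [hm, nsiAt]

-- A's scan from a nonnegative position computes the first-special search from there
theorem scan_eq_find_aux (n : Nat) (cs : List Char) (s : Nat) (hn : cs.length - s ≤ n) :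
    nsiAt cs (s : Int) =
      match (List.drop s (pvPairs cs)).findIdx? (fun q => pvPatMatch q.1 q.2) with
      | some k => ((s + k : Nat) : Int)
      | none => (cs.length : Int) := by
  induction n generalizing s with
  | zero =>
    have hs : cs.length ≤ s := by omega
    rw [List.drop_eq_nil_of_le (by rw [pvPairs_length]; exact hs)]
    simp [nsiAt_end cs (s : Int) (by omega)]
  | succ n ih =>
    rcases Nat.lt_or_ge s cs.length with hs | hs
    · have hp : s < (pvPairs cs).length := by rwa [pvPairs_length]
      rw [List.drop_eq_getElem_cons hp, List.findIdx?_cons]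
      rw [nsiAt_step cs (s : Int) (by omega) (by omega)]
      simp only [if_neg (by omega : ¬ ((s : Int) < 0)), Int.toNat_natCast]
      rw [pairs_pred cs s hp]
      by_cases hsp : pvSpecialAt cs s = true
      · simp [hsp]
      · rw [Bool.not_eq_true] at hsp
        rw [hsp]
        have hcast : (s : Int) + 1 = ((s + 1 : Nat) : Int) := by push_cast; ring
        rw [if_neg (by simp), hcast, ih (s+1) (by omega)]
        cases h : (List.drop (s+1) (pvPairs cs)).findIdx? (fun q => pvPatMatch q.1 q.2) with
        | none => simp
        | some v => simp only [Option.map_some]; rw [if_neg (by simp)]; push_cast; ring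
    · rw [List.drop_eq_nil_of_le (by rw [pvPairs_length]; exact hs)]
      simp [nsiAt_end cs (s : Int) (by omega)]

-- crossing the negative region when it contains no special markup
theorem neg_no_hit (cs : List Char) (k : Nat) (hk : (k : Int) ≤ (cs.length : Int))
    (hns : ∀ p, p < cs.length → (cs.length : Int) - (k : Int) ≤ (p : Int) → pvSpecialAt cs p = false) :
    nsiAt cs (-(k : Int)) = nsiAt cs 0 := by
  induction k with
  | zero => norm_num
  | succ k ih =>
    have hL : 0 < cs.length := by omega
    rw [nsiAt_step cs (-(k+1 : Nat) : Int) (by push_cast; omega) (by push_cast; omega)]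
    have hpos : (if (-(k+1 : Nat) : Int) < 0 then ((cs.length : Int) + (-(k+1 : Nat) : Int)).toNat
        else (-(k+1 : Nat) : Int).toNat) = cs.length - (k+1) := by
      rw [if_pos (by push_cast; omega)]; push_cast; omega
    rw [hpos, hns _ (by omega) (by push_cast; omega)]
    have hstep : (-(k+1 : Nat) : Int) + 1 = -(k : Int) := by push_cast; ring
    rw [if_neg (by simp), hstep]
    exact ih (by omega) (fun p h1 h2 => hns p h1 (by push_cast at h2 ⊢; omega))

-- a special in the wrapped region forces A to return a negative index
theorem neg_hit (cs : List Char) (k : Nat) (hk0 : 0 < k) (hk : (k : Int) ≤ (cs.length : Int))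
    (hhit : ∃ p < cs.length, (cs.length : Int) - (k : Int) ≤ (p : Int) ∧ pvSpecialAt cs p = true) :
    nsiAt cs (-(k : Int)) < 0 := by
  induction k with
  | zero => omega
  | succ k ih =>
    rw [nsiAt_step cs (-(k+1 : Nat) : Int) (by push_cast; omega) (by push_cast; omega)]
    have hpos : (if (-(k+1 : Nat) : Int) < 0 then ((cs.length : Int) + (-(k+1 : Nat) : Int)).toNat
        else (-(k+1 : Nat) : Int).toNat) = cs.length - (k+1) := by
      rw [if_pos (by push_cast; omega)]; push_cast; omega
    rw [hpos]
    by_cases hsp : pvSpecialAt cs (cs.length - (k+1)) = true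
    · rw [if_pos hsp]; push_cast; omega
    · rw [if_neg hsp]
      have hstep : (-(k+1 : Nat) : Int) + 1 = -(k : Int) := by push_cast; ring
      rw [hstep]
      obtain ⟨p, hpL, hpge, hpsp⟩ := hhit
      have hpne : p ≠ cs.length - (k+1) := fun h => hsp (h ▸ hpsp)
      have hk0' : 0 < k := by omega
      exact ih hk0' (by omega) ⟨p, hpL, by push_cast at hpge ⊢; omega, hpsp⟩

-- when start < -len(text), A's first startswith check looks at position 0 and hits
theorem neg_far (cs : List Char) (i : Int) (hi : i < -(cs.length : Int))
    (hpre : (PySem.Chars.startswith cs ['/', '*'] || PySem.Chars.startswith cs ['[', '[']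
      || PySem.Chars.startswith cs ['*', '*', '*'] || PySem.Chars.startswith cs ['*', '*']) = true) :
    nsiAt cs i = i := by
  have hfuel : ((cs.length : Int) - i).toNat = ((cs.length : Int) - (i+1)).toNat + 1 := by omega
  rw [nsiAt, hfuel, nsiGo]
  have hsf : ∀ P, pvStartsFrom cs P i = PySem.Chars.startswith cs P := by
    intro P
    rw [pvStartsFrom]
    have : (if i < 0 then ((cs.length : Int) + i).toNat else i.toNat) = 0 := by
      rw [if_pos (by omega)]; omega
    rw [this, List.drop_zero]
  rw [hsf, hsf, hsf, hsf, if_pos hpre]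

-- pvSpecialAt at position 0 follows from the Pre_ prefix disjunct
theorem pre_prefix_special (cs : List Char)
    (hpre : (PySem.Chars.startswith cs ['/', '*'] || PySem.Chars.startswith cs ['[', '[']
      || PySem.Chars.startswith cs ['*', '*', '*'] || PySem.Chars.startswith cs ['*', '*']) = true) :
    0 < cs.length ∧ pvSpecialAt cs 0 = true := by
  have hL : 0 < cs.length := by
    rcases cs with _ | ⟨c, cs'⟩
    · simp [PySem.Chars.startswith, List.isPrefixOf] at hpre
    · simp
  refine ⟨hL, ?_⟩
  have := hit_drop cs 0 hL
  rw [List.drop_zero] at this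
  rw [← this, hpre]
  simp

-- ===== B-side lemmas: the min-of-finds fold =====

-- Python's find start bound, clamped to [0, len] (slice semantics)
def pvClamp (n : Nat) (start : Int) : Nat :=
  if start < 0 then ((n : Int) + start).toNat else min start.toNat n

theorem pvClamp_le (n : Nat) (start : Int) : pvClamp n start ≤ n := by
  rw [pvClamp]; split <;> omega

-- findFrom with an arbitrary start equals findFrom with the clamped start (nonempty needle)
theorem findFrom_clamped (cs tok : List Char) (htok : tok ≠ []) (start : Int) :
    PySem.Chars.findFrom cs tok start none =
      PySem.Chars.findFrom cs tok ((pvClamp cs.length start : Nat) : Int) none := by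
  have hfind_nil : PySem.Chars.find (List.drop ((cs.length : Nat) : Int).toNat
      (List.take ((cs.length : Nat) : Int).toNat cs)) tok = -1 := by
    rw [Int.toNat_natCast, List.take_length, List.drop_length, PySem.Chars.find_eq_neg_one_iff]
    rintro ⟨s, t, h⟩
    simp only [List.append_eq_nil_iff] at h
    exact htok h.1.2
  simp only [PySem.Chars.findFrom]
  rcases Int.lt_or_le (cs.length : Int) start with hgt | hle
  · have hc : pvClamp cs.length start = cs.length := by rw [pvClamp]; split_ifs <;> omega
    rw [hc]
    have hstL : (if start < 0 then if start + (cs.length : Int) < 0 then 0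
        else start + (cs.length : Int) else start) = start := by split_ifs <;> omega
    have hstR : (if ((cs.length : Nat) : Int) < 0 then
        if ((cs.length : Nat) : Int) + (cs.length : Int) < 0 then 0
        else ((cs.length : Nat) : Int) + (cs.length : Int)
        else ((cs.length : Nat) : Int)) = ((cs.length : Nat) : Int) := by split_ifs <;> omega
    rw [hstL, hstR, if_pos hgt, if_neg (by omega : ¬ (cs.length : Int) < ((cs.length : Nat) : Int)),
      hfind_nil, if_pos rfl]
  · have hst : (if start < 0 then if start + (cs.length : Int) < 0 then 0
        else start + (cs.length : Int) else start) = ((pvClamp cs.length start : Nat) : Int) := by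
      rw [pvClamp]; split_ifs <;> omega
    rw [hst]
    have hstR : (if ((pvClamp cs.length start : Nat) : Int) < 0 then
        if ((pvClamp cs.length start : Nat) : Int) + (cs.length : Int) < 0 then 0
        else ((pvClamp cs.length start : Nat) : Int) + (cs.length : Int)
        else ((pvClamp cs.length start : Nat) : Int)) = ((pvClamp cs.length start : Nat) : Int) := by
      split_ifs <;> omega
    rw [hstR]

-- index-congruence for getElem (used to move between drop-relative and absolute positions)
theorem getElem_of_eq_idx {α : Type} (l : List α) {i j : Nat} (hij : i = j) (hi : i < l.length) :
    l[i]'hi = l[j]'(hij ▸ hi) := by subst hij; rfl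

-- the element of drop s at relative position p - s is the element at absolute position p
theorem drop_getElem_abs {α : Type} (l : List α) (s p : Nat) (hsp : s ≤ p)
    (hlt : p - s < (List.drop s l).length) (hp : p < l.length) :
    (List.drop s l)[p - s]'hlt = l[p]'hp := by
  rw [List.getElem_drop]
  exact getElem_of_eq_idx l (by omega) _

-- first special at or after s, as A's search computes it
def pvFirst (cs : List Char) (s : Nat) : Int :=
  match (List.drop s (pvPairs cs)).findIdx? (fun q => pvPatMatch q.1 q.2) with
  | some k => ((s + k : Nat) : Int)
  | none => (cs.length : Int)

theorem nsiAt_eq_first (cs : List Char) (s : Nat) : nsiAt cs (s : Int) = pvFirst cs s := by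
  rw [pvFirst]; exact scan_eq_find_aux cs.length cs s (by omega)

-- pvFirst characterised: either no special ≥ s and it is len, or it is the least special ≥ s
theorem first_spec (cs : List Char) (s : Nat) :
    (pvFirst cs s = (cs.length : Int) ∧ ∀ p : Nat, s ≤ p → p < cs.length → pvSpecialAt cs p = false) ∨
    (∃ p : Nat, pvFirst cs s = (p : Int) ∧ s ≤ p ∧ p < cs.length ∧ pvSpecialAt cs p = true ∧
      ∀ q : Nat, s ≤ q → q < p → pvSpecialAt cs q = false) := by
  rw [pvFirst]
  cases h : (List.drop s (pvPairs cs)).findIdx? (fun q => pvPatMatch q.1 q.2) with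
  | none =>
    left
    refine ⟨rfl, fun p hsp hpl => ?_⟩
    rw [List.findIdx?_eq_none_iff] at h
    have hlt : p - s < (List.drop s (pvPairs cs)).length := by
      rw [List.length_drop, pvPairs_length]; omega
    have hp : p < (pvPairs cs).length := by rw [pvPairs_length]; omega
    have hmem := h _ (List.mem_iff_getElem.mpr ⟨p - s, hlt, rfl⟩)
    rw [drop_getElem_abs (pvPairs cs) s p hsp hlt hp, pairs_pred cs p hp] at hmem
    exact hmem
  | some k =>
    right
    rw [List.findIdx?_eq_some_iff_getElem] at h
    obtain ⟨hk, hpk, hmin⟩ := h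
    rw [List.length_drop, pvPairs_length] at hk
    have hsk : s + k < (pvPairs cs).length := by rw [pvPairs_length]; omega
    refine ⟨s + k, rfl, by omega, by omega, ?_, ?_⟩
    · rw [List.getElem_drop, pairs_pred cs (s + k) hsk] at hpk
      exact hpk
    · intro q hsq hqk
      have hlt : q - s < (List.drop s (pvPairs cs)).length := by
        rw [List.length_drop, pvPairs_length]; omega
      have hq : q < (pvPairs cs).length := by rw [pvPairs_length]; omega
      have h1 := hmin (q - s) (by omega)
      rw [drop_getElem_abs (pvPairs cs) s q hsq hlt hq, pairs_pred cs q hq] at h1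
      simpa using h1

-- generic facts about the min-of-finds fold
theorem fold_le_init (f : List Char → Int) (toks : List (List Char)) (init : Int) :
    toks.foldl (fun best tok => if 0 ≤ f tok ∧ f tok < best then f tok else best) init ≤ init := by
  induction toks generalizing init with
  | nil => simp
  | cons t ts ih =>
    simp only [List.foldl_cons]
    refine le_trans (ih _) ?_
    split <;> omega

theorem fold_ge (f : List Char → Int) (toks : List (List Char)) (init : Int) (m : Int)
    (hinit : m ≤ init) (hf : ∀ tok ∈ toks, 0 ≤ f tok → m ≤ f tok) :
    m ≤ toks.foldl (fun best tok => if 0 ≤ f tok ∧ f tok < best then f tok else best) init := by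
  induction toks generalizing init with
  | nil => simpa
  | cons t ts ih =>
    simp only [List.foldl_cons]
    refine ih _ ?_ (fun tok ht h0 => hf tok (List.mem_cons_of_mem _ ht) h0)
    split
    · exact hf t List.mem_cons_self (by omega)
    · exact hinit

theorem fold_le_of_mem (f : List Char → Int) (toks : List (List Char)) (init : Int)
    (tok0 : List Char) (h0 : tok0 ∈ toks) (hnn : 0 ≤ f tok0) :
    toks.foldl (fun best tok => if 0 ≤ f tok ∧ f tok < best then f tok else best) init ≤ f tok0 := by
  obtain ⟨l1, l2, rfl⟩ := List.append_of_mem h0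
  rw [List.foldl_append, List.foldl_cons]
  refine le_trans (fold_le_init f l2 _) ?_
  split <;> omega

-- B's fold equals pvFirst at the clamped start
theorem alt_eq_first (text : String) (start : Int) :
    next_special_index_py_alt text start = pvFirst text.toList (pvClamp text.toList.length start) := by
  rw [next_special_index_py_alt]
  set cs := text.toList with hcs
  set c : Nat := pvClamp cs.length start with hc
  have hcl : c ≤ cs.length := pvClamp_le _ _
  -- replace each findFrom by its clamped form
  have hrw : ∀ (tok : List Char), tok ≠ [] →
      PySem.Chars.findFrom cs tok start none = PySem.Chars.findFrom cs tok ((c : Nat) : Int) none :=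
    fun tok h => findFrom_clamped cs tok h start
  have hfold :
      [['\\'], ['*'], ['_'], ['#'], ['/', '*'], ['[', '[']].foldl
        (fun best tok =>
          let j := PySem.Chars.findFrom cs tok start none
          if 0 ≤ j ∧ j < best then j else best) ((cs.length : Int)) =
      [['\\'], ['*'], ['_'], ['#'], ['/', '*'], ['[', '[']].foldl
        (fun best tok =>
          let j := PySem.Chars.findFrom cs tok ((c : Nat) : Int) none
          if 0 ≤ j ∧ j < best then j else best) ((cs.length : Int)) := by
    simp only [List.foldl_cons, List.foldl_nil,
      hrw ['\\'] (by simp), hrw ['*'] (by simp), hrw ['_'] (by simp), hrw ['#'] (by simp),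
      hrw ['/', '*'] (by simp), hrw ['[', '['] (by simp)]
  rw [hfold]
  set f : List Char → Int := fun tok => PySem.Chars.findFrom cs tok ((c : Nat) : Int) none with hf
  have hfoldf :
      [['\\'], ['*'], ['_'], ['#'], ['/', '*'], ['[', '[']].foldl
        (fun best tok =>
          let j := PySem.Chars.findFrom cs tok ((c : Nat) : Int) none
          if 0 ≤ j ∧ j < best then j else best) ((cs.length : Int)) =
      [['\\'], ['*'], ['_'], ['#'], ['/', '*'], ['[', '[']].foldl
        (fun best tok => if 0 ≤ f tok ∧ f tok < best then f tok else best) ((cs.length : Int)) := rfl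
  rw [hfoldf]
  -- token-level facts
  have hspec : ∀ tok, f tok ≠ -1 →
      ((c : Int) ≤ f tok ∧ tok <+: List.drop (f tok).toNat cs ∧
        ∀ i, c ≤ i → i < (f tok).toNat → ¬ tok <+: List.drop i cs) := by
    intro tok hne
    exact PySem.Chars.findFrom_natCast_spec cs tok c hcl hne
  have hneg1 : ∀ tok, f tok = -1 ↔ ¬ tok <:+: List.drop c cs := by
    intro tok
    exact PySem.Chars.findFrom_natCast_eq_neg_one_iff cs tok c hcl
  rcases first_spec cs c with ⟨he, hnone⟩ | ⟨p, he, hcp, hpl, hsp, hmin⟩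
  · -- no special at or after c: every find misses, the fold keeps len
    rw [he]
    have hmiss : ∀ tok ∈ [['\\'], ['*'], ['_'], ['#'], ['/', '*'], ['[', '[']],
        f tok = -1 := by
      intro tok htok
      rw [hneg1]
      intro hinf
      obtain ⟨j, hj⟩ := (PySem.Chars.exists_prefix_drop_iff_isIn tok (List.drop c cs)).mpr
        ((PySem.Chars.isIn_iff_infix tok (List.drop c cs)).mpr hinf)
      rw [List.drop_drop] at hj
      obtain ⟨hL, hS⟩ := prefix_special cs (c + j) tok htok hj
      exact absurd (hnone (c + j) (by omega) hL) (by simp [hS])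
    revert hmiss
    generalize [['\\'], ['*'], ['_'], ['#'], ['/', '*'], ['[', '[']] = toks
    intro hmiss
    induction toks with
    | nil => simp
    | cons t ts ih =>
      simp only [List.foldl_cons]
      rw [if_neg (by rw [hmiss t List.mem_cons_self]; omega)]
      exact ih (fun tok h => hmiss tok (List.mem_cons_of_mem _ h))
  · -- p is the least special ≥ c; the fold returns p
    rw [he]
    obtain ⟨tok0, htok0, hpre0⟩ := specialAt_witness cs p hsp
    have hf0in : PySem.Chars.isIn tok0 (List.drop c cs) = true :=
      (PySem.Chars.exists_prefix_drop_iff_isIn _ _).mp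
        ⟨p - c, by rw [List.drop_drop, show c + (p - c) = p from by omega]; exact hpre0⟩
    have hf0ne : f tok0 ≠ -1 := fun h =>
      ((hneg1 tok0).mp h) ((PySem.Chars.isIn_iff_infix _ _).mp hf0in)
    obtain ⟨hge0, hpre0', hmin0⟩ := hspec tok0 hf0ne
    have hf0le : f tok0 ≤ (p : Int) := by
      by_contra hgt
      exact hmin0 p hcp (by omega) hpre0
    have hub := fold_le_of_mem f [['\\'], ['*'], ['_'], ['#'], ['/', '*'], ['[', '[']]
      ((cs.length : Int)) tok0 htok0 (by omega)
    have hlb := fold_ge f [['\\'], ['*'], ['_'], ['#'], ['/', '*'], ['[', '[']]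
      ((cs.length : Int)) (p : Int) (by omega)
      (fun tok htok h0 => by
        have hne : f tok ≠ -1 := by omega
        obtain ⟨hgec, hpref, _⟩ := hspec tok hne
        obtain ⟨hL, hS⟩ := prefix_special cs (f tok).toNat tok htok hpref
        by_contra hlt
        have := hmin (f tok).toNat (by omega) (by omega)
        simp [hS] at this)
    omega

theorem alt_nonneg (text : String) (start : Int) : 0 ≤ next_special_index_py_alt text start := by
  rw [alt_eq_first]
  rcases first_spec text.toList (pvClamp text.toList.length start) with ⟨he, _⟩ | ⟨p, he, _⟩ <;>
    rw [he] <;> omega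

-- ===== VERDICT (by name: the statement is the Claim_ definition above) =====
theorem next_special_index_py_spec : Claim_unchanged_next_special_index_py := by
  intro text start _hdom hpre
  unfold Spec_next_special_index_py
  intro hnd0
  have hnd : ¬ (start < 0 ∧ ∃ p < text.toList.length, pvSpecialAt text.toList p = true) :=
    fun h => hnd0 ((D_iff text start).mpr h)
  rw [next_special_index_py_eq, alt_eq_first]
  set cs := text.toList with hcs
  rcases Int.lt_or_le start 0 with hneg | hpos
  · -- start < 0 and no special anywhere (else D_ would hold)
    have hnone : ∀ p, p < cs.length → pvSpecialAt cs p = false := by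
      intro p h1
      by_contra hsp
      rw [Bool.not_eq_false] at hsp
      exact hnd ⟨hneg, p, h1, hsp⟩
    have hge : -(cs.length : Int) ≤ start := by
      rcases hpre with h | hstarts
      · exact h
      · obtain ⟨hL, hsp⟩ := pre_prefix_special cs hstarts
        exact absurd (hnone 0 hL) (by simp [hsp])
    have hk : start = -(((-start).toNat : Nat) : Int) := by omega
    have h0 : (0 : Int) = ((0 : Nat) : Int) := rfl
    have hA : nsiAt cs start = (cs.length : Int) := by
      conv_lhs => rw [hk]
      rw [neg_no_hit cs (-start).toNat (by omega) (fun p h1 _ => hnone p h1), h0, nsiAt_eq_first]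
      rcases first_spec cs 0 with ⟨he0, _⟩ | ⟨p, _, _, hpl, hsp, _⟩
      · exact he0
      · exact absurd (hnone p hpl) (by simp [hsp])
    have hB : pvFirst cs (pvClamp cs.length start) = (cs.length : Int) := by
      rcases first_spec cs (pvClamp cs.length start) with ⟨hec, _⟩ | ⟨q, _, _, hql, hqsp, _⟩
      · exact hec
      · exact absurd (hnone q hql) (by simp [hqsp])
    rw [hA, hB]
  · -- start ≥ 0: A scans from start, B from the clamp of start
    rcases Int.lt_or_le start (cs.length : Int) with hlt | hge
    · have hc : pvClamp cs.length start = start.toNat := by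
        rw [pvClamp, if_neg (by omega)]; omega
      conv_lhs => rw [show start = ((start.toNat : Nat) : Int) from by omega]
      rw [nsiAt_eq_first, hc]
    · have hc : pvClamp cs.length start = cs.length := by
        rw [pvClamp, if_neg (by omega)]; omega
      rw [hc, nsiAt_end cs start hge]
      rcases first_spec cs cs.length with ⟨hec, _⟩ | ⟨q, _, hcq, hql, _⟩
      · rw [hec]
      · omega

set_option maxRecDepth 2000 in
theorem next_special_index_py_changed : Claim_changed_next_special_index_py := by
  unfold Claim_changed_next_special_index_py
  refine ⟨by decide, by decide, ?_, by decide, by decide, by decide⟩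
  refine ⟨by decide, Or.inl ⟨'*', ?_, by decide⟩⟩
  have h : (pvDiffWitness_next_special_index_py.1).toList = ['a', '*'] := rfl
  rw [h]; simp

theorem next_special_index_py_tight : Claim_exact_next_special_index_py := by
  intro text start _hdom hpre hD
  obtain ⟨hneg, p, hpL, hpsp⟩ := (D_iff text start).mp hD
  have hB := alt_nonneg text start
  rw [next_special_index_py_eq]
  rcases Int.lt_or_le start (-(text.toList.length : Int)) with hfar | hge
  · -- start < -len: Pre_ gives the prefix token, A returns start < 0; B ≥ 0
    rcases hpre with hge' | hstarts
    · omega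
    · rw [neg_far text.toList start hfar hstarts]; omega
  · have hk : start = -(((-start).toNat : Nat) : Int) := by omega
    by_cases hsuf : ∃ q < text.toList.length,
        (text.toList.length : Int) + start ≤ (q : Int) ∧ pvSpecialAt text.toList q = true
    · -- special in the wrapped tail: A returns a negative index, B ≥ 0
      have hA : nsiAt text.toList start < 0 := by
        conv_lhs => rw [hk]
        refine neg_hit text.toList (-start).toNat (by omega) (by omega) ?_
        obtain ⟨q, h1, h2, h3⟩ := hsuf
        exact ⟨q, h1, by omega, h3⟩
      omega
    · -- no special in the wrapped tail, but one before it: A finds it from 0, B returns len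
      have hns : ∀ q, q < text.toList.length → (text.toList.length : Int) + start ≤ (q : Int) →
          pvSpecialAt text.toList q = false := by
        intro q h1 h2
        by_contra hq
        rw [Bool.not_eq_false] at hq
        exact hsuf ⟨q, h1, h2, hq⟩
      have h0 : (0 : Int) = ((0 : Nat) : Int) := rfl
      have hA : nsiAt text.toList start = pvFirst text.toList 0 := by
        conv_lhs => rw [hk]
        rw [neg_no_hit text.toList (-start).toNat (by omega)
          (fun q h1 h2 => hns q h1 (by omega)), h0, nsiAt_eq_first]
      have hc : pvClamp text.toList.length start = ((text.toList.length : Int) + start).toNat := by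
        rw [pvClamp, if_pos hneg]
      have hBlen : next_special_index_py_alt text start = (text.toList.length : Int) := by
        rw [alt_eq_first, hc]
        rcases first_spec text.toList ((text.toList.length : Int) + start).toNat
          with ⟨he, _⟩ | ⟨q, he, hcq, hql, hqsp, _⟩
        · exact he
        · exact absurd (hns q hql (by omega)) (by simp [hqsp])
      rw [hA, hBlen]
      rcases first_spec text.toList 0 with ⟨_, hnone⟩ | ⟨q, he, _, hql, _, _⟩
      · exact absurd (hnone p (by omega) hpL) (by simp [hpsp])
      · rw [he]; intro hcon; omega
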